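-- pv_equiv track=rewrite | github.com/sonyaallin/eecs4401 | assignments/assignment-resources/more-resources/2023/Self-Assessments/Assignment2/cenicero/funpuzz_csp.py | multiply_solver
-- ===== SOURCE A (Python) =====
-- def multiply_solver(curr_target,dom,n):
--    #generate a list of all tuples of n numbers in dom where they multiply to curr_target
--    if n == 1:
--       # return [[i]] where i == curr_target, if it is not in dom, then it returns []
--       if curr_target in dom:
--          return [[curr_target]]
--       else:
--          return None
--    sltns = []
--    for x in dom:
--       # disregard any values of x that is not a factor of curr_target
--       if curr_target % x != 0:
--          continue
--       # we can safely divide curr_target by x to get an integer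
--       # we sure hope 0 isnt in dom though!
--       new_target = curr_target//x
--       partial_sltns = multiply_solver(new_target,dom,n-1)
--       if partial_sltns is None:
--          continue
--       for s in partial_sltns:
--          sltns.append(s + [x])
--    return sltns
-- ===== SOURCE B (Python) =====
-- def multiply_solver(curr_target, dom, n):
--     # Iterative breadth-first layer expansion: grow (residual, suffix) states
--     # back-to-front instead of recursing; no recursion at all.
--     if n == 1:
--         return [[curr_target]] if curr_target in dom else None
--     if n < 1:
--         return []  # no tuple of non-positive length
--     states = [(curr_target, [])]
--     for _ in range(n - 1):
--         states = [(t // x, [x] + suf) for t, suf in states for x in dom if t % x == 0]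
--         if not states:
--             return []
--     return [[t] + suf for t, suf in states if t in dom]
-- ===== Notes on version B (the rewrite author's own statement) =====
-- stated objective: alternative
-- what changed: B replaces A's branching recursion over the last factor with a non-recursive breadth-first layer expansion: it iteratively grows a worklist of (residual target, suffix) states n-1 times via a comprehension and then keeps the states whose residual lies in dom.
import Mathlib
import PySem

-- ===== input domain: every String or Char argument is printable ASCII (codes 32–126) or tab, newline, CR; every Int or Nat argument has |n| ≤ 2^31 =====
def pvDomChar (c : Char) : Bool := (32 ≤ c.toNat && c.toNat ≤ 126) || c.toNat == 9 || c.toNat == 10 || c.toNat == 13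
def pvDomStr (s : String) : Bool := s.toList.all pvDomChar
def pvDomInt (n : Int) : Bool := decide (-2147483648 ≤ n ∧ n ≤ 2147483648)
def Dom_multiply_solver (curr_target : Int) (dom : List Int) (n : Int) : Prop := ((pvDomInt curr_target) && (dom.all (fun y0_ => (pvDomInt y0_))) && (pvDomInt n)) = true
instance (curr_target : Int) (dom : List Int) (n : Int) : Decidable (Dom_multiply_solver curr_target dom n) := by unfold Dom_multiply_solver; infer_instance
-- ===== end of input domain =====

-- B replaces A's recursion with an iterative breadth-first layer expansion of (residual, suffix) states; return value only.

-- ===== PORT A =====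
-- A's inner 'for x in dom' loop, accumulator-passing; 'solve' is the recursive call at n-1.
def msAloop (solve : Int → Option (List (List Int))) (t : Int) :
    List Int → List (List Int) → List (List Int)
  | [], acc => acc
  | x :: xs, acc =>
    if PySem.Int.mod t x ≠ 0 then msAloop solve t xs acc
    else
      match solve (PySem.Int.floordiv t x) with
      | none => msAloop solve t xs acc
      | some ps => msAloop solve t xs (acc ++ ps.map (fun s => s ++ [x]))

-- fuel = n.toNat; fuel 0 is Python n ≤ 0, where A — whenever it terminates (see Pre_) — returns [].
def msA (dom : List Int) : Nat → Int → Option (List (List Int))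
  | 0, _ => some []
  | 1, t => if t ∈ dom then some [[t]] else none
  | (k+2), t => some (msAloop (msA dom (k+1)) t dom [])

def multiply_solver (curr_target : Int) (dom : List Int) (n : Int) : Option (List (List Int)) :=
  msA dom n.toNat curr_target

-- ===== PORT B =====
-- one layer step: expand every (residual, suffix) state by every divisor x in dom
def msStep (dom : List Int) (states : List (Int × List Int)) : List (Int × List Int) :=
  states.flatMap (fun ts =>
    (dom.filter (fun x => decide (PySem.Int.mod ts.1 x = 0))).map
      (fun x => (PySem.Int.floordiv ts.1 x, x :: ts.2)))

-- run the layer step k times ('for _ in range(n-1)'), stopping as soon as the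
-- worklist is empty ('if not states: return []'; the final comprehension over []
-- yields the same [] Python returns there, so the early return is value-identical)
def msLayers (dom : List Int) : Nat → List (Int × List Int) → List (Int × List Int)
  | 0, states => states
  | k+1, states =>
    if (msStep dom states).isEmpty then [] else msLayers dom k (msStep dom states)

def multiply_solver_alt (curr_target : Int) (dom : List Int) (n : Int) : Option (List (List Int)) :=
  if n = 1 then (if curr_target ∈ dom then some [[curr_target]] else none)
  else if n < 1 then some []
  else
    some (((msLayers dom (n - 1).toNat [(curr_target, [])]).filter
            (fun ts => decide (ts.1 ∈ dom))).map (fun ts => ts.1 :: ts.2))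

-- ===== PRECONDITION & SPEC =====
-- Pre_ excludes exactly the inputs where A raises: 0 ∈ dom with n ≥ 2 (ZeroDivisionError at
-- 'curr_target % x'), and, for n ≤ 0, the inputs whose recursion never bottoms out
-- (RecursionError): a nonempty dom containing 0, 1 or -1, or curr_target = 0.  On the
-- remaining n ≤ 0 inputs A terminates and returns [].
def Pre_multiply_solver (curr_target : Int) (dom : List Int) (n : Int) : Prop :=
  if 1 ≤ n then (n = 1 ∨ (0 : Int) ∉ dom)
  else dom = [] ∨ (curr_target ≠ 0 ∧ (0 : Int) ∉ dom ∧ (1 : Int) ∉ dom ∧ (-1 : Int) ∉ dom)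
instance (curr_target : Int) (dom : List Int) (n : Int) : Decidable (Pre_multiply_solver curr_target dom n) := by unfold Pre_multiply_solver; infer_instance

def pvWitness_multiply_solver : Int × List Int × Int := (12, [2, 3, 4], 2)

def Spec_multiply_solver (curr_target : Int) (dom : List Int) (n : Int) (out : Option (List (List Int))) : Prop := out = multiply_solver_alt curr_target dom n
instance (curr_target : Int) (dom : List Int) (n : Int) (out : Option (List (List Int))) : Decidable (Spec_multiply_solver curr_target dom n out) := by unfold Spec_multiply_solver; infer_instance

-- ===== CLAIM (what is proved, stated in full; the proofs are below) =====
def Claim_equal_multiply_solver : Prop := ∀ (curr_target : Int) (dom : List Int) (n : Int), Dom_multiply_solver curr_target dom n → Pre_multiply_solver curr_target dom n → Spec_multiply_solver curr_target dom n (multiply_solver curr_target dom n)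

-- ===== LEMMAS AND PROOFS =====

-- the solution list of A's recursion at fuel k (None read as the empty list)
def msSols (dom : List Int) (k : Nat) (t : Int) : List (List Int) := (msA dom k t).getD []

theorem msAloop_eq (solve : Int → Option (List (List Int))) (t : Int) :
    ∀ (xs : List Int) (acc : List (List Int)),
      msAloop solve t xs acc = acc ++ xs.flatMap (fun x =>
        if PySem.Int.mod t x = 0
        then ((solve (PySem.Int.floordiv t x)).getD []).map (fun s => s ++ [x]) else []) := by
  intro xs
  induction xs with
  | nil => intro acc; simp [msAloop]
  | cons x xs ih =>
    intro acc
    by_cases hm : PySem.Int.mod t x = 0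
    · simp only [msAloop, hm, ne_eq, not_true_eq_false, if_false, List.flatMap_cons]
      cases hs : solve (PySem.Int.floordiv t x) with
      | none => simp [ih]
      | some ps => simp [ih]
    · simp [msAloop, hm, ih]

theorem msSols_succ (dom : List Int) (k : Nat) (t : Int) :
    msSols dom (k+2) t
      = dom.flatMap (fun x =>
          if PySem.Int.mod t x = 0
          then (msSols dom (k+1) (PySem.Int.floordiv t x)).map (fun s => s ++ [x])
          else []) := by
  simp only [msSols, msA, Option.getD_some]
  rw [msAloop_eq]
  simp

theorem flatMap_filter_if {α β : Type} (p : α → Bool) (f : α → List β) (l : List α) :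
    (l.filter p).flatMap f = l.flatMap (fun x => if p x then f x else []) := by
  induction l with
  | nil => rfl
  | cons a l ih =>
    by_cases h : p a
    · simp [h, ih]
    · simp [h, ih]

-- finishing a k-step layer expansion equals A's solution lists appended to each suffix
theorem finalize_layers (dom : List Int) :
    ∀ (k : Nat) (states : List (Int × List Int)),
      ((msLayers dom k states).filter (fun ts => decide (ts.1 ∈ dom))).map
          (fun ts => ts.1 :: ts.2)
        = states.flatMap (fun ts => (msSols dom (k+1) ts.1).map (fun s => s ++ ts.2)) := by
  intro k
  induction k with
  | zero =>
    intro states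
    induction states with
    | nil => simp [msLayers]
    | cons ts rest ihs =>
      simp only [msLayers] at ihs ⊢
      by_cases h : ts.1 ∈ dom
      · simp [h, ihs, msSols, msA]
      · simp [h, ihs, msSols, msA]
  | succ k ih =>
    intro states
    by_cases he : (msStep dom states).isEmpty
    · simp only [msLayers, he, if_true, List.filter_nil, List.map_nil]
      have hnil : states.flatMap (fun ts =>
          (dom.filter (fun x => decide (PySem.Int.mod ts.1 x = 0))).map
            (fun x => (PySem.Int.floordiv ts.1 x, x :: ts.2))) = [] := by
        have := List.isEmpty_iff.mp he; unfold msStep at this; exact this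
      symm
      rw [List.flatMap_eq_nil_iff]
      intro ts hts
      have hG := List.flatMap_eq_nil_iff.mp hnil ts hts
      have hfil : dom.filter (fun x => decide (PySem.Int.mod ts.1 x = 0)) = [] :=
        List.map_eq_nil_iff.mp hG
      rw [List.map_eq_nil_iff, msSols_succ, List.flatMap_eq_nil_iff]
      intro x hx
      have hx' : ¬ PySem.Int.mod ts.1 x = 0 := by
        have := List.filter_eq_nil_iff.mp hfil x hx
        simpa using this
      simp [hx']
    · simp only [msLayers, he, Bool.false_eq_true, if_false]
      rw [ih (msStep dom states)]
      unfold msStep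
      rw [List.flatMap_assoc]
      apply List.flatMap_congr
      intro ts _
      rw [List.flatMap_map, msSols_succ, List.map_flatMap, flatMap_filter_if]
      apply List.flatMap_congr
      intro x _
      by_cases h : PySem.Int.mod ts.1 x = 0
      · simp [h, List.map_map, Function.comp_def]
      · simp [h]

-- ===== VERDICT (by name: the statement is the Claim_ definition above) =====
theorem multiply_solver_spec : Claim_equal_multiply_solver := by
  intro t dom n _ _
  unfold Spec_multiply_solver multiply_solver multiply_solver_alt
  by_cases h1 : n = 1
  · subst h1; simp [msA]
  · by_cases h2 : n < 1
    · have h0 : n.toNat = 0 := by omega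
      simp [h0, msA, h1, h2]
    · have hex : ∃ m, n.toNat = m + 2 := ⟨n.toNat - 2, by omega⟩
      obtain ⟨m, hm⟩ := hex
      have hm1 : (n - 1).toNat = m + 1 := by omega
      rw [if_neg h1, if_neg h2, hm, hm1, finalize_layers]
      simp [msSols, msA]
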